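-- pv_equiv track=rewrite | github.com/mmattavelli/dmarcus-app | dmarcus.py | calculate_internal_external
-- ===== SOURCE A (Python) =====
-- def calculate_internal_external(report):
--     """Calcola il rapporto IP interni/esterni"""
--     counts = {'internal': 0, 'external': 0}
--     for record in report['records']:
--         if record['is_internal']:
--             counts['internal'] += 1
--         else:
--             counts['external'] += 1
--     return counts
-- ===== SOURCE B (Python) =====
-- def calculate_internal_external(report):
--     """Calcola il rapporto IP interni/esterni"""
--     def count(recs):
--         # divide-and-conquer: (internal, external) pair, combined by addition
--         if len(recs) == 0:
--             return (0, 0)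
--         if len(recs) == 1:
--             return (1, 0) if recs[0]['is_internal'] else (0, 1)
--         mid = len(recs) // 2
--         li, le = count(recs[:mid])
--         ri, re = count(recs[mid:])
--         return (li + ri, le + re)
--     internal, external = count(report['records'])
--     return {'internal': internal, 'external': external}
-- ===== Notes on version B (the rewrite author's own statement) =====
-- stated objective: alternative
-- what changed: B counts by divide-and-conquer: it recursively splits the record list in half, returns an (internal, external) pair for each half and adds them, instead of A's single pass mutating a two-key counter dict.
-- outside the precondition, e.g. on calculate_internal_external({}): A raises KeyError, B raises KeyError; on calculate_internal_external({'records': [{}]}): A raises KeyError, B raises KeyError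
import Mathlib
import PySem

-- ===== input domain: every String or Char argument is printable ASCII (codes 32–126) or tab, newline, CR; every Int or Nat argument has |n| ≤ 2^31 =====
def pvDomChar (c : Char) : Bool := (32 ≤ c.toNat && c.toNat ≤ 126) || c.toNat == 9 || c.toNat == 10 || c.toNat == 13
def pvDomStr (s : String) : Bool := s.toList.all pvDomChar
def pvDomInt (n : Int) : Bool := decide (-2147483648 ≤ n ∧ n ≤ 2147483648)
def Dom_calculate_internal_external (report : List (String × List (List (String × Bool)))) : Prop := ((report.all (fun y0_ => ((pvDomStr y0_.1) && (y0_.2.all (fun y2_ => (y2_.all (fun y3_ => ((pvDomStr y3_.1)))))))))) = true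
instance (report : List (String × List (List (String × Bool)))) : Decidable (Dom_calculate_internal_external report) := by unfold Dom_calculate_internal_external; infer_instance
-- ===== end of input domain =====

-- B replaces A's single-pass two-counter dict loop by a divide-and-conquer count (split the list in half, add the (internal, external) pairs); alternative decomposition, same O(n) cost.

-- ===== PORT A =====
-- Python dict lookup on the incoming association lists (first match; none = KeyError).
def pyLookup {t : Type} (l : List (String × t)) (k : String) : Option t :=
  (l.find? (fun p => p.1 == k)).map (·.2)

-- counts = {'internal': 0, 'external': 0}; for record in report['records']:
--   if record['is_internal'] then counts['internal'] += 1 else counts['external'] += 1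
-- (Pre_ guarantees both lookups succeed; the .getD defaults are never reached on Pre_.)
def calculate_internal_external (report : List (String × List (List (String × Bool)))) : List (String × Int) :=
  let records := (pyLookup report "records").getD []
  let counts : PySem.Dict String Int := PySem.Dict.ofList [("internal", 0), ("external", 0)]
  let counts := records.foldl (fun c record =>
    if (pyLookup record "is_internal").getD false then
      c.modify "internal" 0 (· + 1)
    else
      c.modify "external" 0 (· + 1)) counts
  counts.items

-- ===== PORT B =====
-- def count(recs): divide and conquer returning the (internal, external) pair; Python's locals
-- mid / (li, le) / (ri, re) are inlined (mid = len(recs)//2 appears as the written floordiv term).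
def pvCount (recs : List (List (String × Bool))) : Int × Int :=
  if recs.length = 0 then (0, 0)
  else if recs.length = 1 then
    (if (pyLookup (PySem.List.pyGetD recs 0 []) "is_internal").getD false
     then ((1 : Int), (0 : Int)) else (0, 1))
  else
    ((pvCount (PySem.List.slice recs none (some (PySem.Int.floordiv (recs.length : Int) 2)))).1
       + (pvCount (PySem.List.slice recs (some (PySem.Int.floordiv (recs.length : Int) 2)) none)).1,
     (pvCount (PySem.List.slice recs none (some (PySem.Int.floordiv (recs.length : Int) 2)))).2
       + (pvCount (PySem.List.slice recs (some (PySem.Int.floordiv (recs.length : Int) 2)) none)).2)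
termination_by recs.length
decreasing_by
  all_goals
    have hm : (PySem.Int.floordiv (recs.length : Int) 2) = ((recs.length / 2 : Nat) : Int) := by
      exact_mod_cast PySem.Int.floordiv_natCast recs.length 2
    first
      | (rw [hm, PySem.List.slice_to_natCast]; simp only [List.length_take]; omega)
      | (rw [hm, PySem.List.slice_from_natCast]; simp only [List.length_drop]; omega)

-- internal, external = count(report['records']); return {'internal': internal, 'external': external}
def calculate_internal_external_alt (report : List (String × List (List (String × Bool)))) : List (String × Int) :=
  let records := (pyLookup report "records").getD []
  let p := pvCount records
  [("internal", p.1), ("external", p.2)]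

-- ===== PRECONDITION & SPEC =====
-- A raises KeyError when report lacks the 'records' key or some record lacks 'is_internal'; exactly those inputs are excluded (B raises there too).
def Pre_calculate_internal_external (report : List (String × List (List (String × Bool)))) : Prop :=
  (pyLookup report "records").isSome = true ∧
  ∀ r ∈ (pyLookup report "records").getD [], (pyLookup r "is_internal").isSome = true

instance (report : List (String × List (List (String × Bool)))) : Decidable (Pre_calculate_internal_external report) := by
  unfold Pre_calculate_internal_external; infer_instance

def pvWitness_calculate_internal_external : (List (String × List (List (String × Bool)))) :=
  [("records", [[("is_internal", true)], [("is_internal", false)]])]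

def Spec_calculate_internal_external (report : List (String × List (List (String × Bool)))) (out : List (String × Int)) : Prop := out = calculate_internal_external_alt report
instance (report : List (String × List (List (String × Bool)))) (out : List (String × Int)) : Decidable (Spec_calculate_internal_external report out) := by unfold Spec_calculate_internal_external; infer_instance

-- ===== CLAIM =====
def Claim_equal_calculate_internal_external : Prop := ∀ (report : List (String × List (List (String × Bool)))), Dom_calculate_internal_external report → Pre_calculate_internal_external report → Spec_calculate_internal_external report (calculate_internal_external report)

-- ===== LEMMAS AND PROOFS =====

-- The predicate both programs test on each record.
def pvIsInt (record : List (String × Bool)) : Bool := (pyLookup record "is_internal").getD false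

-- A's loop, on the literal two-key dict, adds the two countP values.
theorem pvA_loop (rs : List (List (String × Bool))) : ∀ (i e : Int),
    rs.foldl (fun c record =>
      if pvIsInt record then c.modify "internal" 0 (· + 1) else c.modify "external" 0 (· + 1))
      (PySem.Dict.mk [("internal", i), ("external", e)])
      = PySem.Dict.mk
          [("internal", i + (rs.countP pvIsInt : Int)),
           ("external", e + (rs.countP (fun r => !pvIsInt r) : Int))] := by
  induction rs with
  | nil => intro i e; simp
  | cons r rs ih =>
    intro i e
    have hmI : (PySem.Dict.mk [("internal", i), ("external", e)]).modify "internal" 0 (· + 1)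
        = PySem.Dict.mk [("internal", i + 1), ("external", e)] := by
      apply PySem.Dict.ext
      simp [PySem.Dict.modify, PySem.Dict.insert, PySem.Dict.getD, PySem.Dict.get?,
        PySem.Dict.contains]
    have hmE : (PySem.Dict.mk [("internal", i), ("external", e)]).modify "external" 0 (· + 1)
        = PySem.Dict.mk [("internal", i), ("external", e + 1)] := by
      apply PySem.Dict.ext
      simp [PySem.Dict.modify, PySem.Dict.insert, PySem.Dict.getD, PySem.Dict.get?,
        PySem.Dict.contains]
    simp only [List.foldl_cons]
    cases hr : pvIsInt r with
    | true =>
      simp only [if_true]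
      rw [hmI, ih]
      apply PySem.Dict.ext
      simp [hr]
      omega
    | false =>
      simp only [Bool.false_eq_true, if_false]
      rw [hmE, ih]
      apply PySem.Dict.ext
      simp [hr]
      omega

-- B's divide-and-conquer computes the same pair of countP values.
theorem pvCount_eq (recs : List (List (String × Bool))) :
    pvCount recs = ((recs.countP pvIsInt : Int), (recs.countP (fun r => !pvIsInt r) : Int)) := by
  fun_induction pvCount recs with
  | case1 recs h0 =>
    have : recs = [] := List.length_eq_zero_iff.mp h0
    subst this; simp
  | case2 recs h0 h1 h2 =>
    obtain ⟨x, rfl⟩ : ∃ x, recs = [x] := by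
      match recs, h1 with | [x], _ => exact ⟨x, rfl⟩
    rw [PySem.List.pyGetD_zero_cons] at h2
    simp [pvIsInt, h2]
  | case3 recs h0 h1 h2 =>
    obtain ⟨x, rfl⟩ : ∃ x, recs = [x] := by
      match recs, h1 with | [x], _ => exact ⟨x, rfl⟩
    rw [PySem.List.pyGetD_zero_cons] at h2
    simp [pvIsInt, h2]
  | case4 recs h0 h1 ihl ihr =>
    have hm : (PySem.Int.floordiv (recs.length : Int) 2) = ((recs.length / 2 : Nat) : Int) := by
      exact_mod_cast PySem.Int.floordiv_natCast recs.length 2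
    simp only [hm, PySem.List.slice_to_natCast, PySem.List.slice_from_natCast] at ihl ihr ⊢
    rw [ihl, ihr]
    have hsplit := List.take_append_drop (recs.length / 2) recs
    have e1 : recs.countP pvIsInt
        = (recs.take (recs.length / 2)).countP pvIsInt + (recs.drop (recs.length / 2)).countP pvIsInt := by
      conv_lhs => rw [← hsplit]
      exact List.countP_append ..
    have e2 : recs.countP (fun r => !pvIsInt r)
        = (recs.take (recs.length / 2)).countP (fun r => !pvIsInt r)
          + (recs.drop (recs.length / 2)).countP (fun r => !pvIsInt r) := by
      conv_lhs => rw [← hsplit]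
      exact List.countP_append ..
    simp only [e1, e2, Prod.mk.injEq]
    constructor <;> push_cast <;> ring

-- ===== VERDICT =====
theorem calculate_internal_external_spec : Claim_equal_calculate_internal_external := by
  intro report _ _
  unfold Spec_calculate_internal_external calculate_internal_external calculate_internal_external_alt
  have h := congrArg PySem.Dict.items
    (pvA_loop ((pyLookup report "records").getD []) 0 0)
  simp only [pvIsInt] at h
  rw [show PySem.Dict.ofList [("internal", (0:Int)), ("external", 0)]
      = PySem.Dict.mk [("internal", 0), ("external", 0)] from by decide]
  simp only [pvCount_eq, pvIsInt]
  simpa using h
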